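-- pv_equiv track=rewrite | github.com/terrysimons/glitchygames | glitchygames/ai/sprite_generator.py | _check_mixed_format
-- ===== SOURCE A (Python) =====
-- def _check_mixed_format(content: str) -> tuple[bool, str]:
--     """Check for invalid mixed static and animated format.
--
--     Args:
--         content: AI response content
--
--     Returns:
--         Tuple of (is_valid, error_message)
--
--     """
--     # Mixed format: [sprite] section with pixels AND [[animation]] sections
--     # Note: animated sprites can have pixels in [[animation.frame]] sections, that's valid
--     if '[sprite]' not in content or '[[animation]]' not in content:
--         return True, ''
--
--     # Check if pixels appears in [sprite] section (invalid for animated)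
--     lines = content.split('\n')
--     in_sprite_section = False
--     for line in lines:
--         stripped = line.strip()
--         if stripped == '[sprite]':
--             in_sprite_section = True
--         elif stripped.startswith('[') and not stripped.startswith('[colors'):
--             in_sprite_section = False
--         elif in_sprite_section and stripped.startswith('pixels'):
--             return False, 'Mixed static and animated format (invalid)'
--
--     return True, ''
-- ===== SOURCE B (Python) =====
-- def _check_mixed_format(content: str) -> tuple[bool, str]:
--     if '[sprite]' not in content or '[[animation]]' not in content:
--         return True, ''
--     # Group lines into consecutive sections: a new section starts at any stripped
--     # line that starts with '[' but not '[colors'; its stripped header is stored,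
--     # all other lines go (stripped) into the current section's body.
--     sections = []
--     header, body = None, []
--     for line in content.split('\n'):
--         s = line.strip()
--         if s.startswith('[') and not s.startswith('[colors'):
--             sections.append((header, body))
--             header, body = s, []
--         else:
--             body.append(s)
--     sections.append((header, body))
--     if any(h == '[sprite]' and any(b.startswith('pixels') for b in bod)
--            for h, bod in sections):
--         return False, 'Mixed static and animated format (invalid)'
--     return True, ''
-- ===== Notes on version B (the rewrite author's own statement) =====
-- stated objective: alternative
-- what changed: A scans lines with a boolean in-sprite flag updated per line; B first groups the lines into consecutive (header, body) sections and then checks whether any section headed exactly '[sprite]' has a body line starting with 'pixels'.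
import Mathlib
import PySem

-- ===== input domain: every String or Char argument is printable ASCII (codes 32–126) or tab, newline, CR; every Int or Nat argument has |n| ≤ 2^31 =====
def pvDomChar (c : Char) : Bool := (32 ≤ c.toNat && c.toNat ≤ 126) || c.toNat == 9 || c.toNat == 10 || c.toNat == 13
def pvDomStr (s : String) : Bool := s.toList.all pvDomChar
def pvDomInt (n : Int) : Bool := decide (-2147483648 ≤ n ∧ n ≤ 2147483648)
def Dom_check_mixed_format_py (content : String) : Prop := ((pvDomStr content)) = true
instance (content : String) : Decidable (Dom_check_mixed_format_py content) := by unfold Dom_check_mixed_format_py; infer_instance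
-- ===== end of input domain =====

-- B replaces A's per-line in-sprite flag scan by grouping lines into (header, body) sections
-- and testing the '[sprite]' sections; same O(n) cost (objective: alternative).

-- ===== PORT A =====
-- the for-loop with early return, state = in_sprite_section
def pvLoopA : List (List Char) → Bool → Bool × String
  | [], _ => (true, "")
  | line :: rest, inSprite =>
      let stripped := PySem.Chars.strip line
      if stripped = "[sprite]".toList then pvLoopA rest true
      else if PySem.Chars.startswith stripped "[".toList && !(PySem.Chars.startswith stripped "[colors".toList) then
        pvLoopA rest false
      else if inSprite && PySem.Chars.startswith stripped "pixels".toList then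
        (false, "Mixed static and animated format (invalid)")
      else pvLoopA rest inSprite

def check_mixed_format_py (content : String) : Bool × String :=
  if !(PySem.Str.isIn "[sprite]" content) || !(PySem.Str.isIn "[[animation]]" content) then
    (true, "")
  else
    pvLoopA (PySem.Chars.splitOn content.toList "\n".toList) false

-- ===== PORT B =====
-- group lines into consecutive sections (header?, stripped body lines)
def pvGroupB : List (List Char) → Option (List Char) → List (List Char) → List (Option (List Char) × List (List Char))
  | [], hdr, body => [(hdr, body)]
  | line :: rest, hdr, body =>
      let s := PySem.Chars.strip line
      if PySem.Chars.startswith s "[".toList && !(PySem.Chars.startswith s "[colors".toList) then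
        (hdr, body) :: pvGroupB rest (some s) []
      else
        pvGroupB rest hdr (body ++ [s])

def pvSpritePixels (sec : Option (List Char) × List (List Char)) : Bool :=
  sec.1 == some "[sprite]".toList && sec.2.any (fun b => PySem.Chars.startswith b "pixels".toList)

def check_mixed_format_py_alt (content : String) : Bool × String :=
  if !(PySem.Str.isIn "[sprite]" content) || !(PySem.Str.isIn "[[animation]]" content) then
    (true, "")
  else if (pvGroupB (PySem.Chars.splitOn content.toList "\n".toList) none []).any pvSpritePixels then
    (false, "Mixed static and animated format (invalid)")
  else (true, "")

-- ===== PRECONDITION & SPEC =====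
def Spec_check_mixed_format_py (content : String) (out : Bool × String) : Prop := out = check_mixed_format_py_alt content
instance (content : String) (out : Bool × String) : Decidable (Spec_check_mixed_format_py content out) := by unfold Spec_check_mixed_format_py; infer_instance

-- ===== CLAIM (what is proved, stated in full; the proofs are below) =====
def Claim_equal_check_mixed_format_py : Prop := ∀ (content : String), Dom_check_mixed_format_py content → Spec_check_mixed_format_py content (check_mixed_format_py content)

-- ===== LEMMAS AND PROOFS =====

-- the current section does not hit, given the flag/header correspondence
lemma pvNoHit (hdr : Option (List Char)) (body : List (List Char)) (flag : Bool)
    (hflag : flag = true ↔ hdr = some "[sprite]".toList)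
    (hbody : flag = true → body.any (fun b => PySem.Chars.startswith b "pixels".toList) = false) :
    pvSpritePixels (hdr, body) = false := by
  cases flag with
  | true =>
      simp only [pvSpritePixels, hflag.mp rfl, beq_self_eq_true, Bool.true_and]
      exact hbody rfl
  | false =>
      have hne : hdr ≠ some "[sprite]".toList := fun h => Bool.false_ne_true (hflag.mpr h)
      simp only [pvSpritePixels, beq_eq_false_iff_ne.mpr hne, Bool.false_and]

-- once the current section is '[sprite]' and its body already holds a pixels line, B reports a hit
lemma pvGroupB_any_of_hit (lines : List (List Char)) (body : List (List Char))
    (hb : body.any (fun b => PySem.Chars.startswith b "pixels".toList) = true) :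
    (pvGroupB lines (some "[sprite]".toList) body).any pvSpritePixels = true := by
  induction lines generalizing body with
  | nil =>
      simp only [pvGroupB, List.any_cons, List.any_nil, Bool.or_false, pvSpritePixels,
        beq_self_eq_true, Bool.true_and]
      exact hb
  | cons line rest ih =>
      simp only [pvGroupB]
      split
      · simp only [List.any_cons, pvSpritePixels, beq_self_eq_true, Bool.true_and, hb,
          Bool.true_or]
      · exact ih (body ++ [PySem.Chars.strip line]) (by simp only [List.any_append, hb, Bool.true_or])

-- the loop of A equals B's section test, given the flag/header correspondence
lemma pvLoop_eq_group (lines : List (List Char)) (hdr : Option (List Char)) (body : List (List Char)) (flag : Bool)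
    (hflag : flag = true ↔ hdr = some "[sprite]".toList)
    (hbody : flag = true → body.any (fun b => PySem.Chars.startswith b "pixels".toList) = false) :
    pvLoopA lines flag =
      (if (pvGroupB lines hdr body).any pvSpritePixels then
        (false, "Mixed static and animated format (invalid)") else (true, "")) := by
  induction lines generalizing hdr body flag with
  | nil =>
      simp only [pvGroupB, pvLoopA, List.any_cons, List.any_nil, Bool.or_false,
        pvNoHit hdr body flag hflag hbody, Bool.false_eq_true, if_false]
  | cons line rest ih =>
      simp only [pvLoopA, pvGroupB]
      by_cases h1 : PySem.Chars.strip line = "[sprite]".toList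
      · have hhead : (PySem.Chars.startswith (PySem.Chars.strip line) "[".toList &&
            !(PySem.Chars.startswith (PySem.Chars.strip line) "[colors".toList)) = true := by
          rw [h1]; decide
        rw [if_pos h1]
        simp only [hhead, if_true]
        rw [ih (some (PySem.Chars.strip line)) [] true (by simp [h1]) (by simp),
          List.any_cons, pvNoHit hdr body flag hflag hbody, Bool.false_or]
      · rw [if_neg h1]
        by_cases h2 : (PySem.Chars.startswith (PySem.Chars.strip line) "[".toList &&
            !PySem.Chars.startswith (PySem.Chars.strip line) "[colors".toList) = true
        · simp only [h2, if_true]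
          rw [ih (some (PySem.Chars.strip line)) [] false
              (by simp only [Bool.false_eq_true, false_iff, Option.some.injEq]
                  exact fun h => absurd h h1) (by simp),
            List.any_cons, pvNoHit hdr body flag hflag hbody, Bool.false_or]
        · rw [Bool.not_eq_true] at h2
          simp only [h2, Bool.false_eq_true, if_false]
          by_cases h3 : (flag && PySem.Chars.startswith (PySem.Chars.strip line) "pixels".toList) = true
          · simp only [h3, if_true]
            obtain ⟨hf, hpx⟩ := Bool.and_eq_true_iff.mp h3
            rw [hflag.mp hf,
              pvGroupB_any_of_hit rest (body ++ [PySem.Chars.strip line])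
                (by simp only [List.any_append, List.any_cons, List.any_nil, hpx, Bool.or_false, Bool.or_true]),
              if_pos rfl]
          · rw [Bool.not_eq_true] at h3
            simp only [h3, Bool.false_eq_true, if_false]
            refine ih hdr (body ++ [PySem.Chars.strip line]) flag hflag ?_
            intro hf
            have hpx : PySem.Chars.startswith (PySem.Chars.strip line) "pixels".toList = false := by
              rw [hf] at h3; simpa using h3
            simp only [List.any_append, List.any_cons, List.any_nil, hbody hf, hpx, Bool.or_false]

-- ===== VERDICT (by name: the statement is the Claim_ definition above) =====
theorem check_mixed_format_py_spec : Claim_equal_check_mixed_format_py := by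
  intro content _
  unfold Spec_check_mixed_format_py check_mixed_format_py check_mixed_format_py_alt
  split
  · rfl
  · exact pvLoop_eq_group _ none [] false (by simp) (by simp)
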